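-- pv_equiv track=rewrite | github.com/nimrodbusany/StatisticalLogDifferencing | src/kTails/ktails.py | generate_equivalent_maps
-- ===== SOURCE A (Python) =====
-- INIT_LABEL = '"init"'
--
-- TERM_LABEL = '"term"'
--
-- def generate_equivalent_maps(traces, k, gen_past=True):
--
--     ftr2ftrs = dict()
--     ftr2past = dict()
--     transitions2traces = dict()
--     tr_id = 0
--     for t in traces:
--         t.insert(0, INIT_LABEL)
--         t.append(TERM_LABEL)
--         for i in range(len(t)):
--             # if i == 0: ## do not unify futures of dummy init
--             #     ftr = tuple([t[0]])
--             # else: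
--             ftr = tuple([w.lower() for w in t[i:i+k]])
--             next_ftr = tuple([w.lower() for w in t[i+1:i+k+1]])
--             ## update data strucutre
--             update_ftr2ftr(ftr, ftr2ftrs, next_ftr)
--             update_transitions2traces(ftr, next_ftr, tr_id, transitions2traces)
--             if gen_past:
--                 past_ftr = tuple([w.lower() for w in t[max(0, i-k-4):i]])
--                 update_ftr2pasts(ftr, past_ftr, ftr2past)
--         tr_id += 1
--
--     if not gen_past:
--         return ftr2ftrs, transitions2traces
--     return ftr2ftrs, ftr2past, transitions2traces
--
-- def update_transitions2traces(ftr, next_ftr, tr_id, transitions2traces):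
--     ## get state outgoing transitions
--     ftr_outgoing_transitions_to_traces_map = transitions2traces.get(ftr, {})
--     ## udpate outgoing transition visiting traces
--     transition_traces = ftr_outgoing_transitions_to_traces_map.get(next_ftr, [])
--     transition_traces.append(tr_id)
--     ftr_outgoing_transitions_to_traces_map[next_ftr] = transition_traces
--     transitions2traces[ftr] = ftr_outgoing_transitions_to_traces_map
--
-- def update_ftr2ftr(ftr, ftr2ftrs, next_ftr):
--     futures = ftr2ftrs.get(ftr, set())
--     futures.add(next_ftr)
--     ftr2ftrs[ftr] = futures
--
-- def update_ftr2pasts(ftr, past_ftr, ftr2past):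
--     pasts = ftr2past.get(ftr, set())
--     pasts.add(past_ftr)
--     ftr2past[ftr] = pasts
-- ===== SOURCE B (Python) =====
-- INIT_LABEL = '"init"'
--
-- TERM_LABEL = '"term"'
--
-- def generate_equivalent_maps(traces, k, gen_past=True):
--     # Stage 1: flatten everything into one event list (ftr, next_ftr, past_ftr, tr_id),
--     # touching no dictionaries while scanning the traces.
--     events = []
--     for tr_id, t in enumerate(traces):
--         t.insert(0, INIT_LABEL)
--         t.append(TERM_LABEL)
--         low = [w.lower() for w in t]
--         for i in range(len(low)):
--             events.append((tuple(low[i:i+k]), tuple(low[i+1:i+k+1]),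
--                            tuple(low[max(0, i-k-4):i]), tr_id))
--
--     # Stage 2: three independent grouping passes over the event list.
--     ftr2ftrs = {}
--     for ftr, nxt, _, _ in events:
--         ftr2ftrs.setdefault(ftr, set()).add(nxt)
--     transitions2traces = {}
--     for ftr, nxt, _, tid in events:
--         transitions2traces.setdefault(ftr, {}).setdefault(nxt, []).append(tid)
--     if not gen_past:
--         return ftr2ftrs, transitions2traces
--     ftr2past = {}
--     for ftr, _, past, _ in events:
--         ftr2past.setdefault(ftr, set()).add(past)
--     return ftr2ftrs, ftr2past, transitions2traces
-- ===== Notes on version B (the rewrite author's own statement) =====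
-- stated objective: alternative
-- what changed: B is a staged map-then-group pipeline: one scan flattens all traces into a flat event list (ftr, next_ftr, past_ftr, tr_id), then three independent grouping passes over that list build ftr2ftrs, transitions2traces and ftr2past, instead of A's single pass that interleaves updates to all three nested dicts per position.
import Mathlib
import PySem

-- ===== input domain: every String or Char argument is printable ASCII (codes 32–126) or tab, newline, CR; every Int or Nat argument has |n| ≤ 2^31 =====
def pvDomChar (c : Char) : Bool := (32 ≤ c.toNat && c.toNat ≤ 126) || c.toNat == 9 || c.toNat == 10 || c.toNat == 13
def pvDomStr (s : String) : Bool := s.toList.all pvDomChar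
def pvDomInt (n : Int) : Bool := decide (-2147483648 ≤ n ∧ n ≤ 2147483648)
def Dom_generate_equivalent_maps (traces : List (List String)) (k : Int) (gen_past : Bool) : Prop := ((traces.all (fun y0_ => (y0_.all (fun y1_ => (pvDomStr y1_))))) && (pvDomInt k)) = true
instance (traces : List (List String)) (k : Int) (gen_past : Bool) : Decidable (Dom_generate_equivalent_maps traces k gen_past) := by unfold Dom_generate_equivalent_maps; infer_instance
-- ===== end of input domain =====

-- B replaces A's single interleaved pass by a staged pipeline: first flatten the traces into a
-- flat event list, then three independent grouping passes build the three maps (objective: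
-- alternative decomposition, same cost). Both A and B mutate each trace in place (insert INIT
-- at the front, append TERM); the equivalence proved here is about the return value.

-- ===== PORT A =====
def INIT_LABEL : String := "\"init\""

def TERM_LABEL : String := "\"term\""

def update_transitions2traces (ftr next_ftr : List String) (tr_id : Int)
    (transitions2traces : PySem.Dict (List String) (PySem.Dict (List String) (List Int))) :
    PySem.Dict (List String) (PySem.Dict (List String) (List Int)) :=
  let m := transitions2traces.getD ftr PySem.Dict.empty
  let transition_traces := m.getD next_ftr []
  transitions2traces.insert ftr (m.insert next_ftr (transition_traces ++ [tr_id]))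

def update_ftr2ftr (ftr : List String)
    (ftr2ftrs : PySem.Dict (List String) (PySem.Set (List String))) (next_ftr : List String) :
    PySem.Dict (List String) (PySem.Set (List String)) :=
  ftr2ftrs.insert ftr (PySem.Set.add (ftr2ftrs.getD ftr PySem.Set.empty) next_ftr)

def update_ftr2pasts (ftr past_ftr : List String)
    (ftr2past : PySem.Dict (List String) (PySem.Set (List String))) :
    PySem.Dict (List String) (PySem.Set (List String)) :=
  ftr2past.insert ftr (PySem.Set.add (ftr2past.getD ftr PySem.Set.empty) past_ftr)

-- Python returns a 2-tuple (ftr2ftrs, transitions2traces) when gen_past is false; that value has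
-- no representation in the declared 3-tuple result type, so Pre_ excludes gen_past = false and
-- the port returns the triple there too.
def generate_equivalent_maps (traces : List (List String)) (k : Int) (gen_past : Bool) :
    (List (List String × List (List String))) × (List (List String × List (List String))) × (List (List String × List (List String × List Int))) :=
  let st := traces.foldl (fun st t =>
      let t' := [INIT_LABEL] ++ t ++ [TERM_LABEL]
      let s := (PySem.List.pyRange 0 (t'.length : Int) 1).foldl (fun s i =>
          let ftr := (PySem.List.slice t' (some i) (some (i + k))).map PySem.Str.lower
          let next_ftr := (PySem.List.slice t' (some (i + 1)) (some (i + k + 1))).map PySem.Str.lower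
          let f2f := update_ftr2ftr ftr s.1 next_ftr
          let t2t := update_transitions2traces ftr next_ftr st.2.2.2 s.2.2
          let f2p := if gen_past then
              update_ftr2pasts ftr ((PySem.List.slice t' (some (max 0 (i - k - 4))) (some i)).map PySem.Str.lower) s.2.1
            else s.2.1
          (f2f, f2p, t2t)) (st.1, st.2.1, st.2.2.1)
      (s.1, s.2.1, s.2.2, st.2.2.2 + 1))
    ((PySem.Dict.empty, PySem.Dict.empty, PySem.Dict.empty, 0) :
      PySem.Dict (List String) (PySem.Set (List String)) × PySem.Dict (List String) (PySem.Set (List String)) × PySem.Dict (List String) (PySem.Dict (List String) (List Int)) × Int)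
  (st.1.items, st.2.1.items, st.2.2.1.items.map (fun p => (p.1, p.2.items)))

-- ===== PORT B =====
-- Stage 1 flattens into events; stage 2 is three independent grouping folds over the events.
def generate_equivalent_maps_alt (traces : List (List String)) (k : Int) (gen_past : Bool) :
    (List (List String × List (List String))) × (List (List String × List (List String))) × (List (List String × List (List String × List Int))) :=
  let events := (PySem.List.enumerate traces 0).foldl (fun evs p =>
      let t' := [INIT_LABEL] ++ p.2 ++ [TERM_LABEL]
      let low := t'.map PySem.Str.lower
      (PySem.List.pyRange 0 (low.length : Int) 1).foldl (fun evs i =>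
          evs ++ [(PySem.List.slice low (some i) (some (i + k)),
                   PySem.List.slice low (some (i + 1)) (some (i + k + 1)),
                   PySem.List.slice low (some (max 0 (i - k - 4))) (some i),
                   p.1)]) evs)
    ([] : List (List String × List String × List String × Int))
  let ftr2ftrs := events.foldl (fun d e =>
      d.insert e.1 (PySem.Set.add (d.getD e.1 PySem.Set.empty) e.2.1))
    (PySem.Dict.empty : PySem.Dict (List String) (PySem.Set (List String)))
  let t2t := events.foldl (fun d e =>
      let m := d.getD e.1 PySem.Dict.empty
      d.insert e.1 (m.insert e.2.1 (m.getD e.2.1 [] ++ [e.2.2.2])))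
    (PySem.Dict.empty : PySem.Dict (List String) (PySem.Dict (List String) (List Int)))
  let f2p := if gen_past then
      events.foldl (fun d e =>
        d.insert e.1 (PySem.Set.add (d.getD e.1 PySem.Set.empty) e.2.2.1))
      (PySem.Dict.empty : PySem.Dict (List String) (PySem.Set (List String)))
    else PySem.Dict.empty
  (ftr2ftrs.items, f2p.items, t2t.items.map (fun p => (p.1, p.2.items)))

-- ===== PRECONDITION & SPEC =====
-- Pre_ excludes gen_past = false, on which A returns a 2-tuple (no ftr2past) that is not a value
-- of the declared 3-tuple result type.
def Pre_generate_equivalent_maps (traces : List (List String)) (k : Int) (gen_past : Bool) : Prop :=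
  gen_past = true
instance (traces : List (List String)) (k : Int) (gen_past : Bool) : Decidable (Pre_generate_equivalent_maps traces k gen_past) := by unfold Pre_generate_equivalent_maps; infer_instance

def pvWitness_generate_equivalent_maps : List (List String) × Int × Bool := ([["a"], ["b", "a"]], 2, true)

def Spec_generate_equivalent_maps (traces : List (List String)) (k : Int) (gen_past : Bool) (out : (List (List String × List (List String))) × (List (List String × List (List String))) × (List (List String × List (List String × List Int)))) : Prop := out = generate_equivalent_maps_alt traces k gen_past
instance (traces : List (List String)) (k : Int) (gen_past : Bool) (out : (List (List String × List (List String))) × (List (List String × List (List String))) × (List (List String × List (List String × List Int)))) : Decidable (Spec_generate_equivalent_maps traces k gen_past out) := by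
  unfold Spec_generate_equivalent_maps
  haveI h3 : DecidableEq ((List (List String × List (List String))) × (List (List String × List (List String × List Int)))) := instDecidableEqProd
  exact instDecidableEqProd out (generate_equivalent_maps_alt traces k gen_past)

-- ===== CLAIM (what is proved, stated in full; the proofs are below) =====
def Claim_equal_generate_equivalent_maps : Prop := ∀ (traces : List (List String)) (k : Int) (gen_past : Bool), Dom_generate_equivalent_maps traces k gen_past → Pre_generate_equivalent_maps traces k gen_past → Spec_generate_equivalent_maps traces k gen_past (generate_equivalent_maps traces k gen_past)

-- ===== LEMMAS AND PROOFS =====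

theorem slice_map {α β : Type} (f : α → β) (xs : List α) (a b : Option Int) :
    PySem.List.slice (xs.map f) a b = (PySem.List.slice xs a b).map f := by
  simp [PySem.List.slice, List.map_drop, List.map_take]

-- one event record, per position i of the lowercased padded trace
def evOf (low : List String) (k tid : Int) (i : Int) :
    List String × List String × List String × Int :=
  (PySem.List.slice low (some i) (some (i + k)),
   PySem.List.slice low (some (i + 1)) (some (i + k + 1)),
   PySem.List.slice low (some (max 0 (i - k - 4))) (some i), tid)

def trEvs (k : Int) (t : List String) (tid : Int) :
    List (List String × List String × List String × Int) :=
  (PySem.List.pyRange 0 (((["\"init\""] ++ t ++ ["\"term\""]).map PySem.Str.lower).length : Int) 1).map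
    (evOf ((["\"init\""] ++ t ++ ["\"term\""]).map PySem.Str.lower) k tid)

def allEvs (k : Int) : List (List String) → Int → List (List String × List String × List String × Int)
  | [], _ => []
  | t :: r, tid => trEvs k t tid ++ allEvs k r (tid + 1)

-- the three grouping steps (exactly B's fold bodies)
def G1 (d : PySem.Dict (List String) (PySem.Set (List String)))
    (e : List String × List String × List String × Int) :
    PySem.Dict (List String) (PySem.Set (List String)) :=
  d.insert e.1 (PySem.Set.add (d.getD e.1 PySem.Set.empty) e.2.1)

def G2 (d : PySem.Dict (List String) (PySem.Dict (List String) (List Int)))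
    (e : List String × List String × List String × Int) :
    PySem.Dict (List String) (PySem.Dict (List String) (List Int)) :=
  let m := d.getD e.1 PySem.Dict.empty
  d.insert e.1 (m.insert e.2.1 (m.getD e.2.1 [] ++ [e.2.2.2]))

def G3 (d : PySem.Dict (List String) (PySem.Set (List String)))
    (e : List String × List String × List String × Int) :
    PySem.Dict (List String) (PySem.Set (List String)) :=
  d.insert e.1 (PySem.Set.add (d.getD e.1 PySem.Set.empty) e.2.2.1)

-- B's event-building fold produces exactly allEvs
theorem events_eq (k : Int) (traces : List (List String)) (s : Int)
    (acc : List (List String × List String × List String × Int)) :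
    ((PySem.List.enumerate traces s).foldl (fun evs p =>
      let t' := ["\"init\""] ++ p.2 ++ ["\"term\""]
      let low := t'.map PySem.Str.lower
      (PySem.List.pyRange 0 (low.length : Int) 1).foldl (fun evs i =>
          evs ++ [(PySem.List.slice low (some i) (some (i + k)),
                   PySem.List.slice low (some (i + 1)) (some (i + k + 1)),
                   PySem.List.slice low (some (max 0 (i - k - 4))) (some i),
                   p.1)]) evs) acc)
    = acc ++ allEvs k traces s := by
  induction traces generalizing s acc with
  | nil => simp [PySem.List.enumerate_nil, allEvs]
  | cons t rest ih =>
      rw [PySem.List.enumerate_cons, List.foldl_cons]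
      simp only []
      rw [PySem.List.foldl_append_singleton_eq_map, ih, allEvs, List.append_assoc]
      rfl

-- A's inner loop (one trace, gen_past = true) is the three grouping folds over that trace's events
theorem inner_split (idx : List Int) (k tid : Int) (t' : List String)
    (a b : PySem.Dict (List String) (PySem.Set (List String)))
    (c : PySem.Dict (List String) (PySem.Dict (List String) (List Int))) :
    (idx.foldl (fun s i =>
        let ftr := (PySem.List.slice t' (some i) (some (i + k))).map PySem.Str.lower
        let next_ftr := (PySem.List.slice t' (some (i + 1)) (some (i + k + 1))).map PySem.Str.lower
        let f2f := s.1.insert ftr (PySem.Set.add (s.1.getD ftr PySem.Set.empty) next_ftr)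
        let t2t := s.2.2.insert ftr ((s.2.2.getD ftr PySem.Dict.empty).insert next_ftr
          ((s.2.2.getD ftr PySem.Dict.empty).getD next_ftr [] ++ [tid]))
        let f2p := s.2.1.insert ftr (PySem.Set.add (s.2.1.getD ftr PySem.Set.empty)
          ((PySem.List.slice t' (some (max 0 (i - k - 4))) (some i)).map PySem.Str.lower))
        (f2f, f2p, t2t)) (a, b, c))
    = ((idx.map (evOf (t'.map PySem.Str.lower) k tid)).foldl G1 a,
       (idx.map (evOf (t'.map PySem.Str.lower) k tid)).foldl G3 b,
       (idx.map (evOf (t'.map PySem.Str.lower) k tid)).foldl G2 c) := by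
  induction idx generalizing a b c with
  | nil => rfl
  | cons i rest ih =>
      simp only [List.foldl_cons, List.map_cons]
      rw [ih]
      congr 1 <;> [skip; congr 1] <;>
        simp [G1, G2, G3, evOf, slice_map]

-- A's outer loop (gen_past = true) is the three grouping folds over all events
theorem outer_split (k : Int) (traces : List (List String))
    (a b : PySem.Dict (List String) (PySem.Set (List String)))
    (c : PySem.Dict (List String) (PySem.Dict (List String) (List Int))) (s : Int) :
    (traces.foldl (fun st t =>
      let t' := ["\"init\""] ++ t ++ ["\"term\""]
      let s' := (PySem.List.pyRange 0 (t'.length : Int) 1).foldl (fun s' i =>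
          let ftr := (PySem.List.slice t' (some i) (some (i + k))).map PySem.Str.lower
          let next_ftr := (PySem.List.slice t' (some (i + 1)) (some (i + k + 1))).map PySem.Str.lower
          let f2f := s'.1.insert ftr (PySem.Set.add (s'.1.getD ftr PySem.Set.empty) next_ftr)
          let t2t := s'.2.2.insert ftr ((s'.2.2.getD ftr PySem.Dict.empty).insert next_ftr
            ((s'.2.2.getD ftr PySem.Dict.empty).getD next_ftr [] ++ [st.2.2.2]))
          let f2p := s'.2.1.insert ftr (PySem.Set.add (s'.2.1.getD ftr PySem.Set.empty)
            ((PySem.List.slice t' (some (max 0 (i - k - 4))) (some i)).map PySem.Str.lower))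
          (f2f, f2p, t2t)) (st.1, st.2.1, st.2.2.1)
      (s'.1, s'.2.1, s'.2.2, st.2.2.2 + 1)) (a, b, c, s))
    = ((allEvs k traces s).foldl G1 a, (allEvs k traces s).foldl G3 b,
       (allEvs k traces s).foldl G2 c, s + (traces.length : Int)) := by
  induction traces generalizing a b c s with
  | nil => simp [allEvs]
  | cons t rest ih =>
      rw [List.foldl_cons]
      simp only []
      rw [inner_split]
      rw [ih]
      simp only [allEvs, List.foldl_append, trEvs, List.length_map]
      simp only [Prod.mk.injEq, List.length_cons, true_and]
      push_cast
      ring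

theorem equal_all (traces : List (List String)) (k : Int) :
    generate_equivalent_maps traces k true = generate_equivalent_maps_alt traces k true := by
  unfold generate_equivalent_maps generate_equivalent_maps_alt update_ftr2ftr
    update_transitions2traces update_ftr2pasts INIT_LABEL TERM_LABEL
  simp only [if_true]
  have hev := events_eq k traces 0 []
  have h := outer_split k traces PySem.Dict.empty PySem.Dict.empty PySem.Dict.empty 0
  simp only [List.length_map, List.nil_append] at hev h ⊢
  rw [hev, h]
  rfl

-- ===== VERDICT (by name: the statement is the Claim_ definition above) =====
theorem generate_equivalent_maps_spec : Claim_equal_generate_equivalent_maps := by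
  intro traces k gen_past _ hpre
  unfold Spec_generate_equivalent_maps
  cases hpre
  exact equal_all traces k
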